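-- pv_equiv track=rewrite | github.com/Phoenixcoder-6/Problem-Solving | 45 Essential Codes/sum of duplicates.py | sumduplicates
-- ===== SOURCE A (Python) =====
-- def sumduplicates(arr):
--     freq={}
--     for num in arr:
--         if num in freq:
--             freq[num]+=1
--         else:
--             freq[num]=1
--
--
--     sorted_set=0
--     for i in freq:
--         if freq[i]>1:
--             sorted_set+= i* freq[i]
--
--     return freq,sorted_set
-- ===== SOURCE B (Python) =====
-- def sumduplicates(arr):
--     freq = {}
--     sorted_set = 0
--     for num in arr:
--         c = freq.get(num, 0) + 1
--         freq[num] = c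
--         if c == 2:
--             sorted_set += 2 * num
--         elif c > 2:
--             sorted_set += num
--     return freq, sorted_set
-- ===== Notes on version B (the rewrite author's own statement) =====
-- stated objective: alternative
-- what changed: Single pass: A's second loop over the dict disappears; the duplicate-weighted sum is maintained incrementally while counting (add 2*num when a count reaches 2, num for each further repeat).
import Mathlib
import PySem

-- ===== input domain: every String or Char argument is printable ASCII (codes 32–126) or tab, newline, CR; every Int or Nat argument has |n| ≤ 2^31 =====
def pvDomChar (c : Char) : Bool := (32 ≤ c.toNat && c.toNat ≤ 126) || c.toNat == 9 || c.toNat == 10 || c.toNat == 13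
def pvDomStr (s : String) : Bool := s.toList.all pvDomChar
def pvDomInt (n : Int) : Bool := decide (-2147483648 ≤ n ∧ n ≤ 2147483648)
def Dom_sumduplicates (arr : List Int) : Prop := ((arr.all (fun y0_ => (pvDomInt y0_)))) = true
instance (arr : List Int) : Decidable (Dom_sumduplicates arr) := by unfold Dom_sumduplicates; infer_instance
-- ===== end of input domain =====

-- B fuses A's two passes into one: the duplicate-weighted sum is maintained
-- while counting, so the second loop over the dict disappears.

-- ===== PORT A =====
-- count loop: if num in freq: freq[num]+=1 else: freq[num]=1
def sumdupStepA (d : PySem.Dict Int Int) (num : Int) : PySem.Dict Int Int :=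
  if d.contains num then d.insert num (d.getD num 0 + 1) else d.insert num 1

def sumduplicates (arr : List Int) : (List (Int × Int)) × Int :=
  let freq := arr.foldl sumdupStepA PySem.Dict.empty
  -- second loop: for i in freq: if freq[i] > 1: sorted_set += i * freq[i]
  let sorted_set := freq.keys.foldl
    (fun acc i => if freq.getD i 0 > 1 then acc + i * freq.getD i 0 else acc) 0
  (freq.items, sorted_set)

-- ===== PORT B =====
-- single loop: c = freq.get(num, 0)+1; freq[num] = c; add 2*num when c == 2, num when c > 2
def sumdupStepB (p : PySem.Dict Int Int × Int) (num : Int) : PySem.Dict Int Int × Int :=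
  let c := p.1.getD num 0 + 1
  (p.1.insert num c,
   if c = 2 then p.2 + 2 * num else if c > 2 then p.2 + num else p.2)

def sumduplicates_alt (arr : List Int) : (List (Int × Int)) × Int :=
  let r := arr.foldl sumdupStepB (PySem.Dict.empty, 0)
  (r.1.items, r.2)

-- ===== PRECONDITION & SPEC =====
def Spec_sumduplicates (arr : List Int) (out : (List (Int × Int)) × Int) : Prop := out = sumduplicates_alt arr
instance (arr : List Int) (out : (List (Int × Int)) × Int) : Decidable (Spec_sumduplicates arr out) := by unfold Spec_sumduplicates; infer_instance

-- ===== CLAIM (what is proved, stated in full; the proofs are below) =====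
def Claim_equal_sumduplicates : Prop := ∀ (arr : List Int), Dom_sumduplicates arr → Spec_sumduplicates arr (sumduplicates arr)

-- ===== LEMMAS AND PROOFS =====

-- contribution of one dict entry to A's second loop
def dupContrib (p : Int × Int) : Int := if p.2 > 1 then p.1 * p.2 else 0

-- A's second-loop value, expressed over the items list
def dupSum (d : PySem.Dict Int Int) : Int := (d.items.map dupContrib).sum

-- replacing the unique item with key `num` changes a mapped sum by the difference of contributions
lemma sum_map_update (l : List (Int × Int)) (num old c : Int)
    (hmem : (num, old) ∈ l) (hnd : (l.map (·.1)).Nodup) :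
    ((l.map (fun p => if p.1 == num then (num, c) else p)).map dupContrib).sum
      = (l.map dupContrib).sum - dupContrib (num, old) + dupContrib (num, c) := by
  induction l with
  | nil => simp at hmem
  | cons q t ih =>
    simp only [List.map_cons, List.nodup_cons] at hnd
    by_cases hq : q.1 = num
    · have hqe : q = (num, old) := by
        rcases List.mem_cons.1 hmem with h | h
        · exact h.symm
        · exact absurd (hq ▸ List.mem_map.2 ⟨(num, old), h, rfl⟩) hnd.1
      have ht : t.map (fun p => if p.1 == num then (num, c) else p) = t.map id := by
        apply List.map_congr_left
        intro p hp
        have hne : p.1 ≠ num := by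
          intro h
          exact hnd.1 (hq ▸ h ▸ List.mem_map.2 ⟨p, hp, rfl⟩)
        simp [hne]
      simp only [List.map_cons, beq_self_eq_true, if_pos, ht, List.map_id,
        List.sum_cons, hqe]
      ring
    · have hmem' : (num, old) ∈ t := by
        rcases List.mem_cons.1 hmem with h | h
        · exact absurd (congrArg Prod.fst h.symm) hq
        · exact h
      have hqif : (if q.1 == num then (num, c) else q) = q := by simp [hq]
      simp only [List.map_cons, hqif, List.sum_cons, ih hmem' hnd.2]
      ring

-- effect of one B-step's insert on dupSum
lemma dupSum_insert (d : PySem.Dict Int Int) (num : Int)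
    (hnd : d.keys.Nodup) (hpos : ∀ p ∈ d.items, 1 ≤ p.2) :
    dupSum (d.insert num (d.getD num 0 + 1))
      = (let c := d.getD num 0 + 1;
         if c = 2 then dupSum d + 2 * num else if c > 2 then dupSum d + num else dupSum d) := by
  by_cases hc : d.contains num = true
  · obtain ⟨old, hget⟩ : ∃ v, d.get? num = some v := by
      rcases h : d.get? num with _ | v
      · rw [PySem.Dict.contains_eq_isSome_get?, h] at hc; simp at hc
      · exact ⟨v, rfl⟩
    have hitem : (num, old) ∈ d.items := PySem.Dict.mem_items_of_get?_eq_some d hget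
    have hgd : d.getD num 0 = old := PySem.Dict.getD_of_mem_items d hitem hnd 0
    have hold : 1 ≤ old := hpos _ hitem
    have hkeys : (d.items.map (·.1)).Nodup := hnd
    simp only [dupSum, PySem.Dict.items_insert_of_contains d _ hc]
    rw [sum_map_update d.items num old (d.getD num 0 + 1) hitem hkeys]
    simp only [hgd, dupContrib]
    rcases lt_or_ge 1 old with h1 | h1
    · have : ¬ (old + 1 = 2) := by omega
      simp only [this, if_false, show old + 1 > 2 by omega, if_pos, h1, if_pos,
        show old + 1 > 1 by omega]
      ring
    · have : old = 1 := by omega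
      subst this
      norm_num
      ring
  · have hc' : d.contains num = false := by simpa using hc
    have hgd : d.getD num 0 = 0 := PySem.Dict.getD_of_not_contains d 0 hc'
    simp only [dupSum, PySem.Dict.items_insert_of_not_contains d _ hc', hgd]
    simp [dupContrib]

-- master invariant: running B's loop from (d, dupSum d) tracks A's count loop,
-- and keys stay Nodup with all counts ≥ 1
lemma loop_eq (arr : List Int) : ∀ (d : PySem.Dict Int Int),
    d.keys.Nodup → (∀ p ∈ d.items, 1 ≤ p.2) →
    arr.foldl sumdupStepB (d, dupSum d)
      = (arr.foldl sumdupStepA d, dupSum (arr.foldl sumdupStepA d))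
    ∧ (arr.foldl sumdupStepA d).keys.Nodup
    ∧ (∀ p ∈ (arr.foldl sumdupStepA d).items, 1 ≤ p.2) := by
  induction arr with
  | nil => intro d hnd hpos; exact ⟨rfl, hnd, hpos⟩
  | cons num t ih =>
    intro d hnd hpos
    have hstepA : sumdupStepA d num = d.insert num (d.getD num 0 + 1) := by
      unfold sumdupStepA
      by_cases h : d.contains num = true
      · simp [h]
      · have h' : d.contains num = false := by simpa using h
        simp [h', PySem.Dict.getD_of_not_contains d 0 h']
    have hstepB : sumdupStepB (d, dupSum d) num
        = (d.insert num (d.getD num 0 + 1), dupSum (d.insert num (d.getD num 0 + 1))) := by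
      unfold sumdupStepB
      simp only []
      rw [dupSum_insert d num hnd hpos]
    have hnd' : (d.insert num (d.getD num 0 + 1)).keys.Nodup :=
      PySem.Dict.nodup_keys_insert d _ _ hnd
    have hpos' : ∀ p ∈ (d.insert num (d.getD num 0 + 1)).items, 1 ≤ p.2 := by
      intro p hp
      rcases (PySem.Dict.mem_items_insert d _ _ p).1 hp with h | h
      · subst h
        rcases h2 : d.contains num with _ | _
        · simp [PySem.Dict.getD_of_not_contains d 0 h2]
        · obtain ⟨v, hget⟩ : ∃ v, d.get? num = some v := by
            rcases h3 : d.get? num with _ | v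
            · rw [PySem.Dict.contains_eq_isSome_get?, h3] at h2; simp at h2
            · exact ⟨v, rfl⟩
          have := hpos _ (PySem.Dict.mem_items_of_get?_eq_some d hget)
          have hgd := PySem.Dict.getD_of_mem_items d
            (PySem.Dict.mem_items_of_get?_eq_some d hget) hnd 0
          simp only [hgd]; omega
      · exact hpos _ h.1
    simp only [List.foldl_cons, hstepB, hstepA]
    exact ih _ hnd' hpos'

-- A's keys-fold IS dupSum when keys are Nodup
lemma keysFold_eq_dupSum (d : PySem.Dict Int Int) (hnd : d.keys.Nodup) :
    d.keys.foldl (fun acc i => if d.getD i 0 > 1 then acc + i * d.getD i 0 else acc) 0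
      = dupSum d := by
  have step : ∀ (acc i : Int),
      (if d.getD i 0 > 1 then acc + i * d.getD i 0 else acc)
        = acc + (if d.getD i 0 > 1 then i * d.getD i 0 else 0) := by
    intro acc i; split_ifs <;> simp
  calc d.keys.foldl (fun acc i => if d.getD i 0 > 1 then acc + i * d.getD i 0 else acc) 0
      = d.keys.foldl (fun acc i => acc + (if d.getD i 0 > 1 then i * d.getD i 0 else 0)) 0 := by
        congr 1; funext acc i; exact step acc i
    _ = (d.keys.map (fun i => if d.getD i 0 > 1 then i * d.getD i 0 else 0)).sum := by
        rw [PySem.List.foldl_add]; simp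
    _ = (d.items.map dupContrib).sum := by
        show ((d.items.map (·.1)).map _).sum = _
        rw [List.map_map]
        congr 1
        apply List.map_congr_left
        intro p hp
        have := PySem.Dict.getD_of_mem_items d (by exact hp) hnd 0
        simp only [Function.comp, dupContrib, this]
    _ = dupSum d := rfl

-- ===== VERDICT (by name: the statement is the Claim_ definition above) =====
theorem sumduplicates_spec : Claim_equal_sumduplicates := by
  intro arr _
  unfold Spec_sumduplicates sumduplicates sumduplicates_alt
  have h0 : dupSum PySem.Dict.empty = 0 := rfl
  obtain ⟨heq, hnd, -⟩ := loop_eq arr PySem.Dict.empty (by simp) (by simp [PySem.Dict.empty])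
  rw [h0] at heq
  show (_, _) = (_, _)
  rw [heq]
  simp only []
  rw [keysFold_eq_dupSum _ hnd]
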